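-- pv_equiv track=rewrite | github.com/KhoiBui16/28Tech_Code_Online | Python/Source Code Python Contest/Contest_03_HamVaLyThuyetSo/Bai18_BinhPhuongSoNguyenTo_1.py | is_beautiful_num
-- ===== SOURCE A (Python) =====
-- import math
--
-- def is_beautiful_num(n):
--     for i in range(2, math.isqrt(n) + 1):
--         if n % i == 0:
--             cnt = 0
--             while n % i == 0:
--                 cnt += 1
--                 n //= i
--             if cnt >= 2:
--                 return True
--     return False
-- ===== SOURCE B (Python) =====
-- import math
--
-- def is_beautiful_num(n):
--     # n has a repeated prime factor iff some i >= 2 has i*i dividing n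
--     return any(n % (i * i) == 0 for i in range(2, math.isqrt(n) + 1))
-- ===== Notes on version B (the rewrite author's own statement) =====
-- stated objective: simpler
-- what changed: Replaced A's factor-extraction with nested while-loop and multiplicity counter (which mutates n) by a single flat pass testing n % (i*i) == 0 (squarefree criterion) via any().
-- outside the precondition, e.g. on is_beautiful_num(-4): A raises ValueError, B raises ValueError
import Mathlib
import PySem

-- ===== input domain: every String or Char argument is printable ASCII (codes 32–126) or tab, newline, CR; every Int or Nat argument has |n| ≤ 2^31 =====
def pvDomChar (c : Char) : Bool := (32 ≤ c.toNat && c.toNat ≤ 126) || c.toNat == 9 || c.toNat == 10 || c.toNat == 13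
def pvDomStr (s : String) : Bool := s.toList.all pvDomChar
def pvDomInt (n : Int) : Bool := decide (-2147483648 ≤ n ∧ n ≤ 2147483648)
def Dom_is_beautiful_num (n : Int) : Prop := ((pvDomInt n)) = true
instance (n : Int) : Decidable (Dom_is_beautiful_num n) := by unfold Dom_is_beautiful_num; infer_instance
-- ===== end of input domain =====

-- B replaces A's nested factor-extraction/counting loop (which mutates n) by one flat
-- pass testing i*i | n; objective: simpler. A raises ValueError (math.isqrt) on n < 0,
-- hence Pre_ requires 0 ≤ n (B raises there too).

-- ===== PORT A =====
-- inner while-loop: `cnt = 0; while n % i == 0: cnt += 1; n //= i`; returns (cnt, n).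
-- The guards 2 ≤ i, 0 < m only ensure termination; at every call site they hold.
def pvAExtract (i m : Nat) : Nat × Nat :=
  if h : m % i = 0 ∧ 2 ≤ i ∧ 0 < m then
    let r := pvAExtract i (m / i)
    (r.1 + 1, r.2)
  else (0, m)
termination_by m
decreasing_by exact Nat.div_lt_self h.2.2 (by omega)

-- `for i in range(2, isqrt(n)+1)` with early return; state: current i, bound s = isqrt(original n), current n
def pvAGo (i s m : Nat) : Bool :=
  if i ≤ s then
    if m % i = 0 then
      let r := pvAExtract i m
      if 2 ≤ r.1 then true else pvAGo (i + 1) s r.2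
    else pvAGo (i + 1) s m
  else false
termination_by s + 1 - i

-- math.isqrt = Nat.sqrt for n ≥ 0 (Pre_ excludes n < 0, where Python raises)
def is_beautiful_num (n : Int) : Bool := pvAGo 2 (Nat.sqrt n.toNat) n.toNat

-- ===== PORT B =====
-- `any(n % (i*i) == 0 for i in range(2, math.isqrt(n) + 1))`
def is_beautiful_num_alt (n : Int) : Bool :=
  (List.range' 2 (Nat.sqrt n.toNat - 1)).any (fun i => n.toNat % (i * i) = 0)

-- ===== PRECONDITION & SPEC =====
-- Pre_ excludes exactly n < 0, where Python's math.isqrt raises ValueError (in A and in B)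
def Pre_is_beautiful_num (n : Int) : Prop := 0 ≤ n
instance (n : Int) : Decidable (Pre_is_beautiful_num n) := by unfold Pre_is_beautiful_num; infer_instance
def pvWitness_is_beautiful_num : Int := (12)

def Spec_is_beautiful_num (n : Int) (out : Bool) : Prop := out = is_beautiful_num_alt n
instance (n : Int) (out : Bool) : Decidable (Spec_is_beautiful_num n out) := by unfold Spec_is_beautiful_num; infer_instance

-- ===== CLAIM (what is proved, stated in full; the proofs are below) =====
def Claim_equal_is_beautiful_num : Prop := ∀ (n : Int), Dom_is_beautiful_num n → Pre_is_beautiful_num n → Spec_is_beautiful_num n (is_beautiful_num n)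

-- ===== LEMMAS AND PROOFS =====

theorem pvAExtract_spec (i : Nat) (hi : 2 ≤ i) : ∀ m, 0 < m →
    0 < (pvAExtract i m).2 ∧ ¬ i ∣ (pvAExtract i m).2 ∧
      m = i ^ (pvAExtract i m).1 * (pvAExtract i m).2 := by
  intro m
  induction m using Nat.strong_induction_on with
  | _ m ih =>
    intro hm
    rw [pvAExtract]
    by_cases hd : m % i = 0
    · simp only [hd, hi, hm, and_true, dif_pos]
      have hidvd : i ∣ m := Nat.dvd_of_mod_eq_zero hd
      have hlt : m / i < m := Nat.div_lt_self hm (by omega)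
      have hpos : 0 < m / i := Nat.div_pos (Nat.le_of_dvd hm hidvd) (by omega)
      obtain ⟨h1, h2, h3⟩ := ih (m / i) hlt hpos
      refine ⟨h1, h2, ?_⟩
      calc m = i * (m / i) := (Nat.mul_div_cancel' hidvd).symm
        _ = i * (i ^ (pvAExtract i (m/i)).1 * (pvAExtract i (m/i)).2) := by rw [← h3]
        _ = i ^ ((pvAExtract i (m/i)).1 + 1) * (pvAExtract i (m/i)).2 := by ring
    · simp only [hd, false_and, dif_neg, not_false_iff]
      exact ⟨hm, fun hdv => hd (Nat.mod_eq_zero_of_dvd hdv), by simp⟩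

theorem pvAGo_spec (s : Nat) : ∀ i m, 2 ≤ i → 0 < m → (∀ p, p.Prime → p < i → ¬ p ∣ m) →
    (pvAGo i s m = true ↔ ∃ p, p.Prime ∧ i ≤ p ∧ p ≤ s ∧ p ^ 2 ∣ m) := by
  intro i m
  induction i, m using pvAGo.induct (s := s) with
  | case1 i m hle hd r h2 =>
    intro hi hm hinv
    rw [pvAGo]
    simp only [hle, hd, if_true]
    have h2' : 2 ≤ (pvAExtract i m).1 := h2
    rw [if_pos h2']
    have hidvd : i ∣ m := Nat.dvd_of_mod_eq_zero hd
    have hiprime : i.Prime := by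
      by_contra hnp
      have hmf : i.minFac ∣ m := dvd_trans (Nat.minFac_dvd i) hidvd
      have hlt : i.minFac < i := (Nat.not_prime_iff_minFac_lt hi).mp hnp
      exact hinv i.minFac (Nat.minFac_prime (by omega)) hlt hmf
    obtain ⟨hp1, hp2, hp3⟩ := pvAExtract_spec i hi m hm
    refine iff_of_true rfl ⟨i, hiprime, le_refl i, hle, ?_⟩
    rw [hp3]
    exact Dvd.dvd.mul_right (pow_dvd_pow i h2') _
  | case2 i m hle hd r hnot2 ih =>
    intro hi hm hinv
    have hn2 : ¬ 2 ≤ (pvAExtract i m).1 := hnot2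
    have ih' : 2 ≤ i + 1 → 0 < (pvAExtract i m).2 →
        (∀ p, p.Prime → p < i + 1 → ¬ p ∣ (pvAExtract i m).2) →
        (pvAGo (i + 1) s (pvAExtract i m).2 = true ↔
          ∃ p, p.Prime ∧ i + 1 ≤ p ∧ p ≤ s ∧ p ^ 2 ∣ (pvAExtract i m).2) := ih
    have hidvd : i ∣ m := Nat.dvd_of_mod_eq_zero hd
    have hiprime : i.Prime := by
      by_contra hnp
      have hmf : i.minFac ∣ m := dvd_trans (Nat.minFac_dvd i) hidvd
      have hlt : i.minFac < i := (Nat.not_prime_iff_minFac_lt hi).mp hnp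
      exact hinv i.minFac (Nat.minFac_prime (by omega)) hlt hmf
    obtain ⟨hp1, hp2, hp3⟩ := pvAExtract_spec i hi m hm
    have hc1 : (pvAExtract i m).1 = 1 := by
      rcases Nat.eq_zero_or_pos (pvAExtract i m).1 with h0 | h1
      · exfalso
        rw [h0, pow_zero, one_mul] at hp3
        exact hp2 (hp3 ▸ hidvd)
      · omega
    rw [hc1, pow_one] at hp3
    have hinv' : ∀ p, p.Prime → p < i + 1 → ¬ p ∣ (pvAExtract i m).2 := by
      intro p hp hplt hpdvd
      rcases Nat.lt_succ_iff_lt_or_eq.mp hplt with h | h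
      · exact hinv p hp h (hpdvd.trans (Dvd.intro_left i hp3.symm))
      · exact hp2 (h ▸ hpdvd)
    rw [pvAGo]
    simp only [hle, hd, if_true]
    rw [if_neg hn2]
    rw [ih' (by omega) hp1 hinv']
    constructor
    · rintro ⟨p, hp, hip, hps, hpd⟩
      exact ⟨p, hp, by omega, hps, hp3 ▸ hpd.mul_left i⟩
    · rintro ⟨p, hp, hip, hps, hpd⟩
      rcases Nat.lt_or_ge i p with h | h
      · refine ⟨p, hp, by omega, hps, ?_⟩
        have hco : Nat.Coprime (p ^ 2) i := (Nat.coprime_primes hp hiprime |>.mpr (by omega)).pow_left 2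
        exact Nat.Coprime.dvd_of_dvd_mul_left hco (hp3 ▸ hpd)
      · exfalso
        have hpi : p = i := by omega
        subst hpi
        rw [hp3, pow_two] at hpd
        exact hp2 ((Nat.mul_dvd_mul_iff_left (by omega : 0 < p)).mp hpd)
  | case3 i m hle hd ih =>
    intro hi hm hinv
    have hinv' : ∀ p, p.Prime → p < i + 1 → ¬ p ∣ m := by
      intro p hp hplt hpdvd
      rcases Nat.lt_succ_iff_lt_or_eq.mp hplt with h | h
      · exact hinv p hp h hpdvd
      · exact hd (Nat.mod_eq_zero_of_dvd (h ▸ hpdvd))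
    rw [pvAGo]
    simp only [hle, hd, if_true, if_false]
    rw [ih (by omega) hm hinv']
    constructor
    · rintro ⟨p, hp, hip, hps, hpd⟩
      exact ⟨p, hp, by omega, hps, hpd⟩
    · rintro ⟨p, hp, hip, hps, hpd⟩
      refine ⟨p, hp, ?_, hps, hpd⟩
      rcases Nat.eq_or_lt_of_le hip with h | h
      · exfalso
        exact hd (Nat.mod_eq_zero_of_dvd (h ▸ (dvd_trans (dvd_pow_self p (by norm_num)) hpd)))
      · omega
  | case4 i m hgt =>
    intro hi hm hinv
    rw [pvAGo]
    simp only [hgt]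
    exact iff_of_false (by simp) (by rintro ⟨p, hp, hip, hps, hpd⟩; omega)

theorem pvAlt_spec (n : Int) : is_beautiful_num_alt n = true ↔
    ∃ p, p.Prime ∧ 2 ≤ p ∧ p ≤ Nat.sqrt n.toNat ∧ p ^ 2 ∣ n.toNat := by
  unfold is_beautiful_num_alt
  rw [List.any_eq_true]
  constructor
  · rintro ⟨i, hmem, hdiv⟩
    rw [List.mem_range'_1] at hmem
    have hdvd : i * i ∣ n.toNat := Nat.dvd_of_mod_eq_zero (of_decide_eq_true hdiv)
    have hp : i.minFac.Prime := Nat.minFac_prime (by omega)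
    refine ⟨i.minFac, hp, hp.two_le, ?_, ?_⟩
    · calc i.minFac ≤ i := Nat.minFac_le (by omega)
        _ ≤ Nat.sqrt n.toNat := by omega
    · rw [pow_two]
      exact (Nat.mul_dvd_mul (Nat.minFac_dvd i) (Nat.minFac_dvd i)).trans hdvd
  · rintro ⟨p, hp, h2, hs, hdvd⟩
    refine ⟨p, ?_, ?_⟩
    · rw [List.mem_range'_1]
      omega
    · rw [pow_two] at hdvd
      exact decide_eq_true (Nat.mod_eq_zero_of_dvd hdvd)

-- ===== VERDICT (by name: the statement is the Claim_ definition above) =====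
theorem is_beautiful_num_spec : Claim_equal_is_beautiful_num := by
  intro n _ _
  unfold Spec_is_beautiful_num
  rcases Nat.eq_zero_or_pos n.toNat with h0 | hpos
  · unfold is_beautiful_num is_beautiful_num_alt
    rw [h0]
    rw [pvAGo]
    simp [Nat.sqrt_zero]
  · have hA := pvAGo_spec (Nat.sqrt n.toNat) 2 n.toNat (le_refl 2) hpos
      (fun p hp hlt _ => absurd hp.two_le (by omega))
    have hB := pvAlt_spec n
    have hiff : is_beautiful_num n = true ↔ is_beautiful_num_alt n = true := by
      unfold is_beautiful_num
      rw [hA, hB]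
    rcases Bool.eq_false_or_eq_true (is_beautiful_num n) with h | h <;>
      rcases Bool.eq_false_or_eq_true (is_beautiful_num_alt n) with h' | h' <;>
      simp [h, h'] at hiff ⊢
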